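-- pv_equiv track=rewrite | github.com/Bleiz82/Agente-Coloring | apps/agents/colorforge_agents/generator/front_matter.py | _niche_category_from_keyword
-- ===== SOURCE A (Python) =====
-- def _niche_category_from_keyword(keyword: str) -> str:
--     """Map a niche keyword to content category (mirrors cover compositor logic)."""
--     kw = keyword.lower()
--     if any(w in kw for w in ("mandala", "zen", "geometric", "meditation", "adult", "stress")):
--         return "Adult"
--     if any(w in kw for w in ("kids", "children", "toddler", "preschool", "kindergarten")):
--         return "Kids"
--     if any(w in kw for w in ("workbook", "activity", "educational", "homeschool")):
--         return "Activity"
--     if any(w in kw for w in ("travel", "pocket", "mini")):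
--         return "Pocket"
--     return "Default"
-- ===== SOURCE B (Python) =====
-- # B: single position-scan of the lowered text — at each start index check which niche
-- # keywords begin there (dict keyword->category), collect matched categories in a set,
-- # then resolve by precedence order; replaces A's per-keyword substring searches (objective: alternative).
-- _CATEGORY_OF = {
--     "mandala": "Adult", "zen": "Adult", "geometric": "Adult", "meditation": "Adult",
--     "adult": "Adult", "stress": "Adult",
--     "kids": "Kids", "children": "Kids", "toddler": "Kids", "preschool": "Kids",
--     "kindergarten": "Kids",
--     "workbook": "Activity", "activity": "Activity", "educational": "Activity",
--     "homeschool": "Activity",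
--     "travel": "Pocket", "pocket": "Pocket", "mini": "Pocket",
-- }
-- _PRIORITY = ("Adult", "Kids", "Activity", "Pocket")
--
-- def _niche_category_from_keyword(keyword: str) -> str:
--     kw = keyword.lower()
--     found = set()
--     for i in range(len(kw)):
--         for w, cat in _CATEGORY_OF.items():
--             if kw.startswith(w, i):
--                 found.add(cat)
--     for cat in _PRIORITY:
--         if cat in found:
--             return cat
--     return "Default"
-- ===== Notes on version B (the rewrite author's own statement) =====
-- stated objective: alternative
-- what changed: Instead of A's four if-blocks each scanning the text per keyword, B makes one pass over the text positions, collects every category whose keyword starts at some position into a set via a keyword->category dict, and then resolves the winner by a precedence list.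
import Mathlib
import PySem

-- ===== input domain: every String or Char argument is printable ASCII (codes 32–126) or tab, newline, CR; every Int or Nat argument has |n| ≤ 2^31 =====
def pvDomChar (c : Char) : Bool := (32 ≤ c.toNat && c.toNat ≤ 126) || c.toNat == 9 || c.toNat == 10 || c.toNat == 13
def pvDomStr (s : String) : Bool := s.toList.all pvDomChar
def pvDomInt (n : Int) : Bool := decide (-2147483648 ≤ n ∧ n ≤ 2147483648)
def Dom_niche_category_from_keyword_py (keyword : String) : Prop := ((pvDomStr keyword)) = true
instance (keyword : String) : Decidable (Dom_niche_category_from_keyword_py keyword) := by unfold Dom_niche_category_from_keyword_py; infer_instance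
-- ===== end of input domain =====

-- B: one position-scan of the lowered text collecting matched categories in a set, then a
-- precedence resolution — a different traversal from A's per-keyword substring searches (objective: alternative).

-- ===== PORT A =====
-- Literal port of A: lower once, then four if-blocks with any() substring tests.
def niche_category_from_keyword_py (keyword : String) : String :=
  let kw := PySem.Str.lower keyword
  if ["mandala", "zen", "geometric", "meditation", "adult", "stress"].any (fun w => PySem.Str.isIn w kw) then
    "Adult"
  else if ["kids", "children", "toddler", "preschool", "kindergarten"].any (fun w => PySem.Str.isIn w kw) then
    "Kids"
  else if ["workbook", "activity", "educational", "homeschool"].any (fun w => PySem.Str.isIn w kw) then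
    "Activity"
  else if ["travel", "pocket", "mini"].any (fun w => PySem.Str.isIn w kw) then
    "Pocket"
  else
    "Default"

-- ===== PORT B =====
-- _CATEGORY_OF dict as an association list in insertion order (iterated via .items()).
def nicheMap : List (String × String) :=
  [ ("mandala", "Adult"), ("zen", "Adult"), ("geometric", "Adult"), ("meditation", "Adult"),
    ("adult", "Adult"), ("stress", "Adult"),
    ("kids", "Kids"), ("children", "Kids"), ("toddler", "Kids"), ("preschool", "Kids"),
    ("kindergarten", "Kids"),
    ("workbook", "Activity"), ("activity", "Activity"), ("educational", "Activity"),
    ("homeschool", "Activity"),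
    ("travel", "Pocket"), ("pocket", "Pocket"), ("mini", "Pocket") ]

-- 'for cat in _PRIORITY: if cat in found: return cat' / final 'return "Default"'.
def nichePick (found : PySem.Set String) : List String → String
  | [] => "Default"
  | c :: rest => if c ∈ found then c else nichePick found rest

-- Port of B. 'kw.startswith(w, i)' with 0 ≤ i ≤ len(kw) is exactly the prefix test on
-- (kw.toList.drop i) (PySem.Chars.startswith); 'range(len(kw))' is List.range (length ≥ 0).
def niche_category_from_keyword_py_alt (keyword : String) : String :=
  let kw := PySem.Str.lower keyword
  let found := (List.range kw.toList.length).foldl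
    (fun acc i => nicheMap.foldl
      (fun acc p =>
        if PySem.Chars.startswith (kw.toList.drop i) p.1.toList then PySem.Set.add acc p.2 else acc)
      acc)
    PySem.Set.empty
  nichePick found ["Adult", "Kids", "Activity", "Pocket"]

-- ===== PRECONDITION & SPEC =====
def Spec_niche_category_from_keyword_py (keyword : String) (out : String) : Prop := out = niche_category_from_keyword_py_alt keyword
instance (keyword : String) (out : String) : Decidable (Spec_niche_category_from_keyword_py keyword out) := by unfold Spec_niche_category_from_keyword_py; infer_instance

-- ===== CLAIM (what is proved, stated in full; the proofs are below) =====
def Claim_equal_niche_category_from_keyword_py : Prop := ∀ (keyword : String), Dom_niche_category_from_keyword_py keyword → Spec_niche_category_from_keyword_py keyword (niche_category_from_keyword_py keyword)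

-- ===== LEMMAS AND PROOFS =====

-- Membership after the inner fold (scan of nicheMap at one position).
theorem mem_foldl_addIf {α : Type} (f : α → Bool) (g : α → String) (xs : List α)
    (acc : PySem.Set String) (c : String) :
    c ∈ xs.foldl (fun a x => if f x then PySem.Set.add a (g x) else a) acc ↔
      c ∈ acc ∨ ∃ x ∈ xs, f x = true ∧ g x = c := by
  induction xs generalizing acc with
  | nil => simp
  | cons x xs ih =>
    simp only [List.foldl_cons, ih, List.exists_mem_cons_iff]
    by_cases h : f x = true
    · rw [if_pos h]
      simp only [PySem.Set.mem_add, h, true_and]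
      tauto
    · rw [if_neg h]
      simp only [h]
      tauto

-- Membership after a fold whose step satisfies a membership characterisation.
theorem mem_foldl_step {ι : Type} (step : PySem.Set String → ι → PySem.Set String)
    (P : ι → String → Prop)
    (h : ∀ a i c, c ∈ step a i ↔ c ∈ a ∨ P i c)
    (xs : List ι) (acc : PySem.Set String) (c : String) :
    c ∈ xs.foldl step acc ↔ c ∈ acc ∨ ∃ i ∈ xs, P i c := by
  induction xs generalizing acc with
  | nil => simp
  | cons x xs ih =>
    simp only [List.foldl_cons, ih, h, List.exists_mem_cons_iff]
    tauto

-- A nonempty pattern is a prefix at some valid start position iff it occurs in the text.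
theorem exists_start_iff_isIn (w s : List Char) (hw : w ≠ []) :
    (∃ i ∈ List.range s.length, PySem.Chars.startswith (s.drop i) w = true) ↔
      PySem.Chars.isIn w s = true := by
  rw [← PySem.Chars.exists_prefix_drop_iff_isIn]
  constructor
  · rintro ⟨i, _, hi⟩
    exact ⟨i, (PySem.Chars.startswith_iff _ _).mp hi⟩
  · rintro ⟨j, hj⟩
    refine ⟨j, ?_, (PySem.Chars.startswith_iff _ _).mpr hj⟩
    rw [List.mem_range]
    by_contra h
    rw [not_lt] at h
    rw [List.drop_eq_nil_of_le h] at hj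
    exact hw (List.prefix_nil.mp hj)

-- Membership of a category in B's collected set, characterised by A's any() conditions.
theorem mem_found_iff (s : List Char) (c : String) :
    c ∈ (List.range s.length).foldl
        (fun acc i => nicheMap.foldl
          (fun acc p =>
            if PySem.Chars.startswith (s.drop i) p.1.toList then PySem.Set.add acc p.2 else acc)
          acc)
        PySem.Set.empty ↔
      ∃ p ∈ nicheMap, PySem.Chars.isIn p.1.toList s = true ∧ p.2 = c := by
  rw [mem_foldl_step _ (fun i c => ∃ p ∈ nicheMap,
        PySem.Chars.startswith (s.drop i) p.1.toList = true ∧ p.2 = c)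
      (fun a i c => mem_foldl_addIf _ _ _ _ _)]
  simp only [PySem.Set.empty, List.not_mem_nil, false_or]
  constructor
  · rintro ⟨i, hi, p, hp, hst, hc⟩
    refine ⟨p, hp, ?_, hc⟩
    refine (exists_start_iff_isIn _ _ ?_).mp ⟨i, hi, hst⟩
    fin_cases hp <;> decide
  · rintro ⟨p, hp, hin, hc⟩
    have hw : p.1.toList ≠ [] := by fin_cases hp <;> decide
    obtain ⟨i, hi, hst⟩ := (exists_start_iff_isIn _ _ hw).mpr hin
    exact ⟨i, hi, p, hp, hst, hc⟩

-- ===== VERDICT (by name: the statement is the Claim_ definition above) =====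
set_option maxHeartbeats 1000000 in
theorem niche_category_from_keyword_py_spec : Claim_equal_niche_category_from_keyword_py := by
  intro keyword _
  unfold Spec_niche_category_from_keyword_py niche_category_from_keyword_py
    niche_category_from_keyword_py_alt
  simp only [nichePick, nicheMap]
  have h := fun c => mem_found_iff (PySem.Str.lower keyword).toList c
  simp only [nicheMap, List.exists_mem_cons_iff, List.not_mem_nil, false_and, exists_false,
    or_false] at h
  have hA := h "Adult"
  have hK := h "Kids"
  have hC := h "Activity"
  have hP := h "Pocket"
  simp only [String.reduceEq, and_true, and_false, or_false, false_or] at hA hK hC hP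
  have a1 : (List.any ["mandala", "zen", "geometric", "meditation", "adult", "stress"] (fun w => PySem.Str.isIn w (PySem.Str.lower keyword)) = true) ↔ (PySem.Chars.isIn "mandala".toList (PySem.Str.lower keyword).toList = true ∨ PySem.Chars.isIn "zen".toList (PySem.Str.lower keyword).toList = true ∨ PySem.Chars.isIn "geometric".toList (PySem.Str.lower keyword).toList = true ∨ PySem.Chars.isIn "meditation".toList (PySem.Str.lower keyword).toList = true ∨ PySem.Chars.isIn "adult".toList (PySem.Str.lower keyword).toList = true ∨ PySem.Chars.isIn "stress".toList (PySem.Str.lower keyword).toList = true) := by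
    simp [PySem.Str.isIn_eq]
  have a2 : (List.any ["kids", "children", "toddler", "preschool", "kindergarten"] (fun w => PySem.Str.isIn w (PySem.Str.lower keyword)) = true) ↔ (PySem.Chars.isIn "kids".toList (PySem.Str.lower keyword).toList = true ∨ PySem.Chars.isIn "children".toList (PySem.Str.lower keyword).toList = true ∨ PySem.Chars.isIn "toddler".toList (PySem.Str.lower keyword).toList = true ∨ PySem.Chars.isIn "preschool".toList (PySem.Str.lower keyword).toList = true ∨ PySem.Chars.isIn "kindergarten".toList (PySem.Str.lower keyword).toList = true) := by
    simp [PySem.Str.isIn_eq]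
  have a3 : (List.any ["workbook", "activity", "educational", "homeschool"] (fun w => PySem.Str.isIn w (PySem.Str.lower keyword)) = true) ↔ (PySem.Chars.isIn "workbook".toList (PySem.Str.lower keyword).toList = true ∨ PySem.Chars.isIn "activity".toList (PySem.Str.lower keyword).toList = true ∨ PySem.Chars.isIn "educational".toList (PySem.Str.lower keyword).toList = true ∨ PySem.Chars.isIn "homeschool".toList (PySem.Str.lower keyword).toList = true) := by
    simp [PySem.Str.isIn_eq]
  have a4 : (List.any ["travel", "pocket", "mini"] (fun w => PySem.Str.isIn w (PySem.Str.lower keyword)) = true) ↔ (PySem.Chars.isIn "travel".toList (PySem.Str.lower keyword).toList = true ∨ PySem.Chars.isIn "pocket".toList (PySem.Str.lower keyword).toList = true ∨ PySem.Chars.isIn "mini".toList (PySem.Str.lower keyword).toList = true) := by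
    simp [PySem.Str.isIn_eq]
  by_cases q1 : (PySem.Chars.isIn "mandala".toList (PySem.Str.lower keyword).toList = true ∨ PySem.Chars.isIn "zen".toList (PySem.Str.lower keyword).toList = true ∨ PySem.Chars.isIn "geometric".toList (PySem.Str.lower keyword).toList = true ∨ PySem.Chars.isIn "meditation".toList (PySem.Str.lower keyword).toList = true ∨ PySem.Chars.isIn "adult".toList (PySem.Str.lower keyword).toList = true ∨ PySem.Chars.isIn "stress".toList (PySem.Str.lower keyword).toList = true)
  · rw [if_pos (a1.mpr q1), if_pos (hA.mpr q1)]
  · rw [if_neg (fun hq => q1 (a1.mp hq)), if_neg (fun hq => q1 (hA.mp hq))]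
    by_cases q2 : (PySem.Chars.isIn "kids".toList (PySem.Str.lower keyword).toList = true ∨ PySem.Chars.isIn "children".toList (PySem.Str.lower keyword).toList = true ∨ PySem.Chars.isIn "toddler".toList (PySem.Str.lower keyword).toList = true ∨ PySem.Chars.isIn "preschool".toList (PySem.Str.lower keyword).toList = true ∨ PySem.Chars.isIn "kindergarten".toList (PySem.Str.lower keyword).toList = true)
    · rw [if_pos (a2.mpr q2), if_pos (hK.mpr q2)]
    · rw [if_neg (fun hq => q2 (a2.mp hq)), if_neg (fun hq => q2 (hK.mp hq))]
      by_cases q3 : (PySem.Chars.isIn "workbook".toList (PySem.Str.lower keyword).toList = true ∨ PySem.Chars.isIn "activity".toList (PySem.Str.lower keyword).toList = true ∨ PySem.Chars.isIn "educational".toList (PySem.Str.lower keyword).toList = true ∨ PySem.Chars.isIn "homeschool".toList (PySem.Str.lower keyword).toList = true)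
      · rw [if_pos (a3.mpr q3), if_pos (hC.mpr q3)]
      · rw [if_neg (fun hq => q3 (a3.mp hq)), if_neg (fun hq => q3 (hC.mp hq))]
        by_cases q4 : (PySem.Chars.isIn "travel".toList (PySem.Str.lower keyword).toList = true ∨ PySem.Chars.isIn "pocket".toList (PySem.Str.lower keyword).toList = true ∨ PySem.Chars.isIn "mini".toList (PySem.Str.lower keyword).toList = true)
        · rw [if_pos (a4.mpr q4), if_pos (hP.mpr q4)]
        · rw [if_neg (fun hq => q4 (a4.mp hq)), if_neg (fun hq => q4 (hP.mp hq))]
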